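-- pv_equiv track=rewrite | github.com/Mansama18-code/python-c2-312-2025-ejercicios | Clase6_funciones_recursivas/funcion_recursiva.py | sumar_digitos
-- ===== SOURCE A (Python) =====
-- def sumar_digitos(numero: int) -> int:
--
--     numero_str = str(numero)
--     tamano_numero = len(numero_str ) - 1
--     if tamano_numero < 1:
--         resultado = int(numero_str[tamano_numero])
--     else:
--         resultado = int(numero_str[tamano_numero]) + sumar_digitos(int(numero_str[tamano_numero - 1]))
--     return resultado
-- ===== SOURCE B (Python) =====
-- def sumar_digitos(numero: int) -> int:
--     m = -numero if numero < 0 else numero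
--     if m < 10:
--         return m
--     return m % 10 + m // 10 % 10
-- ===== Notes on version B (the rewrite author's own statement) =====
-- stated objective: simpler
-- what changed: Replaces string conversion, index bookkeeping and recursion by a closed arithmetic form on m = |numero|: m if m < 10 else m % 10 + m // 10 % 10 (the sum of the last two decimal digits, which is all A's one-level recursion ever computes).
-- outside the precondition, e.g. on sumar_digitos(-5): A raises ValueError, B returns 5; on sumar_digitos(-9): A raises ValueError, B returns 9; on sumar_digitos(-1): A raises ValueError, B returns 1
import Mathlib
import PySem

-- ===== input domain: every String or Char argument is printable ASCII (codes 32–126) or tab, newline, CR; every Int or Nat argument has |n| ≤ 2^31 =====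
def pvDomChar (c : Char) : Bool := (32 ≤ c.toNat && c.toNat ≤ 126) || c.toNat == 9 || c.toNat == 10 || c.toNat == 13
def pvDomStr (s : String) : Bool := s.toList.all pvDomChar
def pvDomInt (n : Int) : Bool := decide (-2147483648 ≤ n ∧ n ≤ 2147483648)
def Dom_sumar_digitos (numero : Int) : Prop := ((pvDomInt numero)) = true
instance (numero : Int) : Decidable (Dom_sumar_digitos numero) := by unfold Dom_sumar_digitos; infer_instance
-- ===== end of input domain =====

-- B replaces A's string conversion, index bookkeeping and one-level recursion by the closed
-- arithmetic form m if m < 10 else m % 10 + m // 10 % 10 on m = |numero| (objective: simpler).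

-- ===== PORT A =====
-- int(numero_str[i]) on a single character: exact via PySem.Int.ofChars? (none = ValueError)
def pyDigitInt (c : Char) : Option Int := PySem.Int.ofChars? [c]

-- fuel is a totality guard only (the Python recursion always terminates where it returns);
-- fuel 0 is never reached with the fuel sumar_digitos supplies on inputs in Pre_.
def sumar_digitos_go : Nat → Int → Int
  | 0, _ => 0
  | fuel+1, numero =>
    let numero_str := PySem.Int.toChars numero
    let tamano_numero : Int := (numero_str.length : Int) - 1
    if tamano_numero < 1 then
      ((PySem.List.pyGet? numero_str tamano_numero).bind pyDigitInt).getD 0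
    else
      ((PySem.List.pyGet? numero_str tamano_numero).bind pyDigitInt).getD 0
        + sumar_digitos_go fuel
            (((PySem.List.pyGet? numero_str (tamano_numero - 1)).bind pyDigitInt).getD 0)

def sumar_digitos (numero : Int) : Int := sumar_digitos_go (numero.natAbs + 2) numero

-- ===== PORT B =====
def sumar_digitos_alt (numero : Int) : Int :=
  let m : Int := if numero < 0 then -numero else numero
  if m < 10 then m
  else PySem.Int.mod m 10 + PySem.Int.mod (PySem.Int.floordiv m 10) 10

-- ===== PRECONDITION & SPEC =====
-- Pre_ excludes -9 ≤ numero ≤ -1, where A raises ValueError: str(numero) is '-d' and the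
-- recursive call does int('-').
def Pre_sumar_digitos (numero : Int) : Prop := 0 ≤ numero ∨ numero ≤ -10
instance (numero : Int) : Decidable (Pre_sumar_digitos numero) := by
  unfold Pre_sumar_digitos; infer_instance

def pvWitness_sumar_digitos : Int := 37

def Spec_sumar_digitos (numero : Int) (out : Int) : Prop := out = sumar_digitos_alt numero
instance (numero : Int) (out : Int) : Decidable (Spec_sumar_digitos numero out) := by
  unfold Spec_sumar_digitos; infer_instance

-- ===== CLAIM (what is proved, stated in full; the proofs are below) =====
def Claim_equal_sumar_digitos : Prop := ∀ (numero : Int), Dom_sumar_digitos numero → Pre_sumar_digitos numero → Spec_sumar_digitos numero (sumar_digitos numero)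

-- ===== LEMMAS AND PROOFS =====

-- structure of core's toDigitsCore with enough fuel, in terms of Nat.digits
theorem toDigitsCore_eq_digits (f : Nat) : ∀ (n : Nat) (l : List Char), 0 < n → n < f →
    Nat.toDigitsCore 10 f n l = ((Nat.digits 10 n).map Nat.digitChar).reverse ++ l := by
  induction f with
  | zero => intro n l hn hf; omega
  | succ f ih =>
    intro n l hn hf
    rw [Nat.toDigitsCore]
    by_cases h : n / 10 = 0
    · have h10 : n < 10 := by omega
      have : Nat.digits 10 n = [n % 10] := by
        rw [Nat.digits_def' (by norm_num) hn, h, Nat.digits_zero]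
      simp [h, this]
    · have hpos : 0 < n / 10 := Nat.pos_of_ne_zero h
      have hlt : n / 10 < f := by
        have : n / 10 < n := Nat.div_lt_self hn (by norm_num)
        omega
      simp only [h, if_false]
      rw [ih (n / 10) _ hpos hlt, Nat.digits_def' (by norm_num) hn]
      simp

theorem toDigits10_eq (m : Nat) (hm : 0 < m) :
    Nat.toDigits 10 m = ((Nat.digits 10 m).map Nat.digitChar).reverse := by
  rw [Nat.toDigits, toDigitsCore_eq_digits (m + 1) m [] hm (by omega), List.append_nil]

theorem digit_int (d : Nat) (hd : d < 10) :
    pyDigitInt (Nat.digitChar d) = some (d : Int) := by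
  interval_cases d <;> decide

-- the last and second-to-last characters of l ++ [y, x], the way the ports read them
theorem pyGet_last (l : List Char) (y x : Char) :
    PySem.List.pyGet? (l ++ [y, x]) (((l ++ [y, x]).length : Int) - 1) = some x := by
  have h1 : (((l ++ [y, x]).length : Int) - 1) = ((l.length + 1 : Nat) : Int) := by
    simp; omega
  rw [h1, PySem.List.pyGet?_natCast]
  rw [List.getElem?_append_right (by omega)]
  simp

theorem pyGet_penult (l : List Char) (y x : Char) :
    PySem.List.pyGet? (l ++ [y, x]) ((((l ++ [y, x]).length : Int) - 1) - 1) = some y := by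
  have h1 : ((((l ++ [y, x]).length : Int) - 1) - 1) = ((l.length : Nat) : Int) := by
    simp; omega
  rw [h1, PySem.List.pyGet?_natCast]
  rw [List.getElem?_append_right (by omega)]
  simp

-- base case of the recursion: a single-digit non-negative argument
theorem go_base (f : Nat) (d : Nat) (hd : d < 10) :
    sumar_digitos_go (f + 1) (d : Int) = (d : Int) := by
  interval_cases d <;>
    · simp [sumar_digitos_go, PySem.Int.toChars, PySem.List.pyGet?, PySem.List.pyIdx?,
        pyDigitInt, Nat.toDigits, Nat.toDigitsCore]
      decide

-- main unfolding: whenever str(numero) ends in the two digit characters of m // 10 % 10 and m % 10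
theorem go_main (f : Nat) (n : Int) (l : List Char) (m : Nat)
    (hs : PySem.Int.toChars n = l ++ [Nat.digitChar (m / 10 % 10), Nat.digitChar (m % 10)]) :
    sumar_digitos_go (f + 2) n = ((m % 10 : Nat) : Int) + ((m / 10 % 10 : Nat) : Int) := by
  show sumar_digitos_go ((f + 1) + 1) n = _
  rw [sumar_digitos_go]
  simp only [hs]
  have hlen : ¬ (((l ++ [Nat.digitChar (m / 10 % 10), Nat.digitChar (m % 10)]).length : Int) - 1 < 1) := by
    simp; omega
  rw [if_neg hlen, pyGet_last, pyGet_penult]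
  simp only [Option.bind_some, digit_int _ (Nat.mod_lt m (by norm_num)),
    digit_int _ (Nat.mod_lt (m / 10) (by norm_num)), Option.getD_some]
  rw [go_base f _ (Nat.mod_lt _ (by norm_num))]

-- the digits-of-m decomposition both sign cases share
theorem toDigits_decomp (m : Nat) (hm : 10 ≤ m) :
    Nat.toDigits 10 m =
      ((Nat.digits 10 (m / 10 / 10)).map Nat.digitChar).reverse
        ++ [Nat.digitChar (m / 10 % 10), Nat.digitChar (m % 10)] := by
  rw [toDigits10_eq m (by omega),
      Nat.digits_def' (b := 10) (by norm_num) (by omega),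
      Nat.digits_def' (b := 10) (by norm_num) (by omega)]
  simp

theorem alt_of_ge (m : Nat) (hm : 10 ≤ m) (n : Int) (hn : (if n < 0 then -n else n) = (m : Int)) :
    sumar_digitos_alt n = ((m % 10 : Nat) : Int) + ((m / 10 % 10 : Nat) : Int) := by
  unfold sumar_digitos_alt
  rw [hn, if_neg (by omega)]
  have h1 : PySem.Int.mod (m : Int) 10 = ((m % 10 : Nat) : Int) := by
    exact_mod_cast PySem.Int.mod_natCast m 10
  have h2 : PySem.Int.floordiv (m : Int) 10 = ((m / 10 : Nat) : Int) := by
    exact_mod_cast PySem.Int.floordiv_natCast m 10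
  have h3 : PySem.Int.mod ((m / 10 : Nat) : Int) 10 = ((m / 10 % 10 : Nat) : Int) := by
    exact_mod_cast PySem.Int.mod_natCast (m / 10) 10
  rw [h1, h2, h3]

-- ===== VERDICT (by name: the statement is the Claim_ definition above) =====
theorem sumar_digitos_spec : Claim_equal_sumar_digitos := by
  intro n _ hpre
  unfold Spec_sumar_digitos
  rcases hpre with hnn | hneg
  · by_cases hlt : n < 10
    · -- 0 ≤ n < 10 : single digit
      obtain ⟨d, rfl⟩ : ∃ d : Nat, n = (d : Int) := ⟨n.toNat, (Int.toNat_of_nonneg hnn).symm⟩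
      have hd : d < 10 := by exact_mod_cast hlt
      unfold sumar_digitos
      rw [show (d : Int).natAbs + 2 = (d + 1) + 1 by simp,
          go_base (d + 1) d hd]
      unfold sumar_digitos_alt
      have h0 : ¬ ((d : Int) < 0) := by omega
      simp only [if_neg h0]
      rw [if_pos (by exact_mod_cast hd)]
    · -- n ≥ 10
      obtain ⟨m, rfl⟩ : ∃ m : Nat, n = (m : Int) := ⟨n.toNat, (Int.toNat_of_nonneg hnn).symm⟩
      have hm : 10 ≤ m := by exact_mod_cast not_lt.mp hlt
      have hs : PySem.Int.toChars (m : Int) =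
          ((Nat.digits 10 (m / 10 / 10)).map Nat.digitChar).reverse
            ++ [Nat.digitChar (m / 10 % 10), Nat.digitChar (m % 10)] := by
        rw [PySem.Int.toChars, if_neg (by omega)]
        rw [show (m : Int).toNat = m by simp]
        exact toDigits_decomp m hm
      unfold sumar_digitos
      rw [show (m : Int).natAbs + 2 = m + 2 by simp,
          go_main m (m : Int) _ m hs,
          alt_of_ge m hm (m : Int) (by rw [if_neg (by omega)])]
  · -- n ≤ -10
    set m : Nat := n.natAbs with hmdef
    have hm : 10 ≤ m := by omega
    have hnm : n = -(m : Int) := by omega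
    have hs : PySem.Int.toChars n =
        ('-' :: ((Nat.digits 10 (m / 10 / 10)).map Nat.digitChar).reverse)
          ++ [Nat.digitChar (m / 10 % 10), Nat.digitChar (m % 10)] := by
      rw [PySem.Int.toChars, if_pos (by omega), hmdef]
      rw [List.cons_append]
      exact congrArg ('-' :: ·) (toDigits_decomp m hm)
    unfold sumar_digitos
    rw [show n.natAbs + 2 = m + 2 by omega,
        go_main m n _ m hs,
        alt_of_ge m hm n (by rw [if_pos (by omega)]; omega)]
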